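-- pv_equiv track=rewrite | github.com/jkbowle/Udacity_Exploratory_Data_Analysis | ProcessRetroData.py | get_innings_from_line
-- ===== SOURCE A (Python) =====
-- def get_innings_from_line(line_score):
--     innings = 0
--     paren = False
--     for x in range(len(line_score)):
--         val = line_score[x]
--         if paren:
--             if val == ")":
--                 innings = innings + 1
--                 paren = False
--         else:
--             if val == "(":
--                 paren = True
--             else:
--                 innings = innings + 1
--     return innings
-- ===== SOURCE B (Python) =====
-- def get_innings_from_line(line_score):
--     # jump between parenthesis delimiters with str.find instead of a per-char state machine
--     total = 0
--     i = 0
--     n = len(line_score)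
--     while True:
--         j = line_score.find("(", i)
--         if j == -1:
--             return total + (n - i)
--         k = line_score.find(")", j + 1)
--         if k == -1:
--             return total + (j - i)
--         total += (j - i) + 1
--         i = k + 1
-- ===== Notes on version B (the rewrite author's own statement) =====
-- stated objective: faster
-- what changed: B replaces A's per-character two-state scan by an index-jumping loop that uses str.find to hop from each opening parenthesis to the next closing one and counts whole stretches of plain characters by index arithmetic.
import Mathlib
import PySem

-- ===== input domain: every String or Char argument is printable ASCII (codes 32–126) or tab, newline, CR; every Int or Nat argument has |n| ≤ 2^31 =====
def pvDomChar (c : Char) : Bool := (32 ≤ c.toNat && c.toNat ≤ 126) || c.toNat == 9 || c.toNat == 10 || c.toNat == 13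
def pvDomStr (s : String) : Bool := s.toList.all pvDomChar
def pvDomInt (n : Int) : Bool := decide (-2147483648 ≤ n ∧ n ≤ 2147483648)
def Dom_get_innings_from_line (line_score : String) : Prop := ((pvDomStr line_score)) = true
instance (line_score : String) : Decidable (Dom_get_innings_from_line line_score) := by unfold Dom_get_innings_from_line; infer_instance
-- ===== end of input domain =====

-- B replaces A's per-character state machine by an index-jumping loop on str.find; objective: faster by a constant factor (delimiter scanning moves into str.find).

-- ===== PORT A =====
-- per-character state machine: state = (innings so far, inside-paren flag)
def aStep (st : Int × Bool) (val : Char) : Int × Bool :=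
  if st.2 then
    if val = ')' then (st.1 + 1, false) else st
  else
    if val = '(' then (st.1, true) else (st.1 + 1, st.2)

def get_innings_from_line (line_score : String) : Int :=
  (line_score.toList.foldl aStep (0, false)).1

-- ===== PORT B =====
-- bound facts about findFrom, needed by altLoop for its hi argument and termination
theorem pvFindFromBounds (cs sub : List Char) (hsub : sub ≠ []) (i : Nat) (hi : i ≤ cs.length)
    (h : PySem.Chars.findFrom cs sub (i : Int) ≠ -1) :
    (i : Int) ≤ PySem.Chars.findFrom cs sub (i : Int) ∧
      (PySem.Chars.findFrom cs sub (i : Int)).toNat < cs.length := by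
  obtain ⟨h1, h2, _⟩ := PySem.Chars.findFrom_natCast_spec cs sub i hi h
  refine ⟨h1, ?_⟩
  have hlen := h2.length_le
  have hpos : 0 < sub.length := List.length_pos_of_ne_nil hsub
  simp [List.length_drop] at hlen
  omega

-- index-jumping loop of Source B: i jumps from delimiter to delimiter via str.find(sub, start)
def altLoop (cs : List Char) (total : Int) (i : Nat) (hi : i ≤ cs.length) : Int :=
  if hj : PySem.Chars.findFrom cs ['('] (i : Int) = -1 then
    total + ((cs.length : Int) - (i : Int))
  else
    have hjb := pvFindFromBounds cs ['('] (by simp) i hi hj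
    have hcast : (PySem.Chars.findFrom cs ['('] (i : Int)) + 1
        = (((PySem.Chars.findFrom cs ['('] (i : Int)).toNat + 1 : Nat) : Int) := by omega
    if hk : PySem.Chars.findFrom cs [')']
        ((PySem.Chars.findFrom cs ['('] (i : Int)) + 1) = -1 then
      total + (PySem.Chars.findFrom cs ['('] (i : Int) - (i : Int))
    else
      have hkb := pvFindFromBounds cs [')']
        (by simp) ((PySem.Chars.findFrom cs ['('] (i : Int)).toNat + 1)
        (by omega) (by rw [← hcast]; exact hk)
      altLoop cs (total + (PySem.Chars.findFrom cs ['('] (i : Int) - (i : Int)) + 1)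
        ((PySem.Chars.findFrom cs [')']
          ((PySem.Chars.findFrom cs ['('] (i : Int)) + 1)).toNat + 1)
        (by rw [hcast]; omega)
termination_by cs.length - i
decreasing_by
  rw [hcast]
  omega

def get_innings_from_line_alt (line_score : String) : Int :=
  altLoop line_score.toList 0 0 (Nat.zero_le _)

-- ===== PRECONDITION & SPEC =====
def Spec_get_innings_from_line (line_score : String) (out : Int) : Prop := out = get_innings_from_line_alt line_score
instance (line_score : String) (out : Int) : Decidable (Spec_get_innings_from_line line_score out) := by unfold Spec_get_innings_from_line; infer_instance

-- ===== CLAIM (what is proved, stated in full; the proofs are below) =====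
def Claim_equal_get_innings_from_line : Prop := ∀ (line_score : String), Dom_get_innings_from_line line_score → Spec_get_innings_from_line line_score (get_innings_from_line line_score)

-- ===== LEMMAS AND PROOFS =====

-- the abstract two-state counter both programs compute
def pvSM : Bool → List Char → Int
  | _, [] => 0
  | false, c :: cs => if c = '(' then pvSM true cs else 1 + pvSM false cs
  | true, c :: cs => if c = ')' then 1 + pvSM false cs else pvSM true cs

theorem foldl_aStep_eq (cs : List Char) : ∀ (t : Int) (b : Bool),
    (cs.foldl aStep (t, b)).1 = t + pvSM b cs := by
  induction cs with
  | nil => intro t b; simp [pvSM]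
  | cons c cs ih =>
    intro t b
    cases b <;> by_cases hc : c = '(' <;> by_cases hc' : c = ')' <;>
      simp_all [aStep, pvSM, List.foldl_cons] <;> ring

theorem dropWhile_eq_drop_takeWhile {α : Type} (p : α → Bool) (l : List α) :
    l.dropWhile p = l.drop (l.takeWhile p).length := by
  induction l with
  | nil => simp
  | cons x xs ih => by_cases hx : p x <;> simp [List.takeWhile_cons, List.dropWhile_cons, hx, ih]

theorem singleton_prefix_iff (c : Char) (l : List Char) : [c] <+: l ↔ l.head? = some c := by
  cases l with
  | nil => simp
  | cons x xs => simp [List.cons_prefix_cons, eq_comm]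

theorem singleton_infix_iff (c : Char) (l : List Char) : [c] <:+: l ↔ c ∈ l := by
  constructor
  · intro h; exact h.subset (by simp)
  · intro h
    obtain ⟨s, t, rfl⟩ := List.append_of_mem h
    exact ⟨s, t, by simp⟩

-- find of a single-character needle is the length of the longest needle-free prefix
theorem find_singleton (c : Char) (l : List Char) (h : c ∈ l) :
    PySem.Chars.find l [c] = ((l.takeWhile (· ≠ c)).length : Int) := by
  have hinf : [c] <:+: l := (singleton_infix_iff c l).mpr h
  have hnn : 0 ≤ PySem.Chars.find l [c] := (PySem.Chars.find_nonneg_iff l [c]).mpr hinf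
  obtain ⟨hpre, hmin⟩ := PySem.Chars.find_spec hnn
  have hne : l.dropWhile (· ≠ c) ≠ [] := by
    intro hnil
    rw [List.dropWhile_eq_nil_iff] at hnil
    simpa using hnil c h
  have hhead := List.head_dropWhile_not (fun x => x ≠ c) hne
  have hpt : [c] <+: l.drop (l.takeWhile (· ≠ c)).length := by
    rw [singleton_prefix_iff, ← dropWhile_eq_drop_takeWhile]
    rw [List.head?_eq_some_head hne]
    simp at hhead
    simp [hhead]
  have hfle : (PySem.Chars.find l [c]).toNat ≤ (l.takeWhile (· ≠ c)).length := by
    by_contra hlt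
    exact hmin _ (by omega) hpt
  have htwf : ¬ (PySem.Chars.find l [c]).toNat < (l.takeWhile (· ≠ c)).length := by
    intro hlt
    have hget : l[(PySem.Chars.find l [c]).toNat]? = some c := by
      rw [← List.head?_drop]; exact (singleton_prefix_iff c _).mp hpre
    have hflen : (PySem.Chars.find l [c]).toNat < l.length := by
      have := (List.takeWhile_prefix (l := l) (· ≠ c)).length_le
      omega
    have hgeq : l[(PySem.Chars.find l [c]).toNat] = c := by
      rw [List.getElem?_eq_getElem hflen] at hget
      exact Option.some.inj hget
    have hgtw : (l.takeWhile (· ≠ c))[(PySem.Chars.find l [c]).toNat]? = some c := by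
      rw [List.getElem?_eq_getElem hlt, (List.takeWhile_prefix _).getElem hlt]
      exact congrArg some hgeq
    have hmem : c ∈ l.takeWhile (· ≠ c) := List.mem_of_getElem? hgtw
    have := List.mem_takeWhile_imp hmem
    simp at this
  omega

-- characterisations of pvSM in takeWhile/dropWhile form
theorem pvSM_false_eq (cs : List Char) :
    pvSM false cs = (match cs.dropWhile (· ≠ '(') with
      | [] => (cs.length : Int)
      | _ :: rest => ((cs.takeWhile (· ≠ '(')).length : Int) + pvSM true rest) := by
  induction cs with
  | nil => simp [pvSM]
  | cons c cs ih =>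
    by_cases hc : c = '('
    · subst hc; simp [pvSM, List.dropWhile_cons, List.takeWhile_cons]
    · rw [show pvSM false (c :: cs) = 1 + pvSM false cs by simp [pvSM, hc]]
      rw [ih]
      have hdec : (decide (c ≠ '(')) = true := by simp [hc]
      simp only [List.dropWhile_cons, List.takeWhile_cons, hdec, if_true]
      cases cs.dropWhile (· ≠ '(') <;> simp <;> push_cast <;> ring

theorem pvSM_true_eq (cs : List Char) :
    pvSM true cs = (match cs.dropWhile (· ≠ ')') with
      | [] => (0 : Int)
      | _ :: rest => 1 + pvSM false rest) := by
  induction cs with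
  | nil => simp [pvSM]
  | cons c cs ih =>
    by_cases hc : c = ')'
    · subst hc; simp [pvSM, List.dropWhile_cons]
    · rw [show pvSM true (c :: cs) = pvSM true cs by simp [pvSM, hc]]
      rw [ih]
      have hdec : (decide (c ≠ ')')) = true := by simp [hc]
      simp only [List.dropWhile_cons, hdec, if_true]

theorem altLoop_eq (fuel : Nat) : ∀ (cs : List Char) (i : Nat) (hi : i ≤ cs.length)
    (total : Int), cs.length - i ≤ fuel →
    altLoop cs total i hi = total + pvSM false (cs.drop i) := by
  induction fuel with
  | zero =>
    intro cs i hi total hf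
    have hieq : i = cs.length := by omega
    rw [altLoop.eq_def]
    have hdrop : cs.drop i = [] := by simp [hieq]
    have hj : PySem.Chars.findFrom cs ['('] (i : Int) = -1 := by
      rw [PySem.Chars.findFrom_natCast_eq_neg_one_iff cs ['('] i hi, hdrop]
      simp [singleton_infix_iff]
    rw [dif_pos hj, hdrop]
    simp [pvSM, hieq]
  | succ m ih =>
    intro cs i hi total hf
    rw [altLoop.eq_def]
    by_cases hj : PySem.Chars.findFrom cs ['('] (i : Int) = -1
    · rw [dif_pos hj]
      rw [PySem.Chars.findFrom_natCast_eq_neg_one_iff cs ['('] i hi] at hj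
      rw [singleton_infix_iff] at hj
      have hdw : (cs.drop i).dropWhile (· ≠ '(') = [] := by
        rw [List.dropWhile_eq_nil_iff]
        intro x hx; simp; rintro rfl; exact hj hx
      rw [pvSM_false_eq, hdw]
      simp
      omega
    · rw [dif_neg hj]
      -- the first '(' at index i + f
      have hjeq := PySem.Chars.findFrom_natCast cs ['('] i hi
      rw [if_neg (by intro h; exact hj (by rw [hjeq, if_pos h]))] at hjeq
      set sub := cs.drop i with hsub
      have hmem : '(' ∈ sub := by
        by_contra hm
        exact hj ((PySem.Chars.findFrom_natCast_eq_neg_one_iff cs ['('] i hi).mpr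
          (by rw [singleton_infix_iff]; exact hm))
      have hfs := find_singleton '(' sub hmem
      set tw := sub.takeWhile (· ≠ '(') with htw
      have hjval : PySem.Chars.findFrom cs ['('] (i : Int) = ((i + tw.length : Nat) : Int) := by
        rw [hjeq, hfs]; push_cast; ring
      have hdwne : sub.dropWhile (· ≠ '(') ≠ [] := by
        intro hnil; rw [List.dropWhile_eq_nil_iff] at hnil; simpa using hnil '(' hmem
      have htwlt : tw.length < sub.length := by
        have hd := dropWhile_eq_drop_takeWhile (fun x => x ≠ '(') sub
        rw [← htw] at hd
        by_contra hge
        exact hdwne (by rw [hd, List.drop_eq_nil_iff]; omega)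
      have hsublen : sub.length = cs.length - i := by simp [hsub]
      have hrest : sub.dropWhile (· ≠ '(') = '(' :: cs.drop (i + tw.length + 1) := by
        have hh : (sub.dropWhile (fun x => decide (x ≠ '('))).head hdwne = '(' := by
          have := List.head_dropWhile_not (fun x => decide (x ≠ '(')) hdwne
          rwa [decide_eq_false_iff_not, not_ne_iff] at this
        rw [← List.cons_head_tail hdwne, hh]
        congr 1
        rw [dropWhile_eq_drop_takeWhile, List.tail_drop, ← htw, hsub, List.drop_drop]
        congr 1 <;> omega
      have hb1 : i + tw.length + 1 ≤ cs.length := by omega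
      have hcast : (PySem.Chars.findFrom cs ['('] (i : Int)) + 1
          = ((i + tw.length + 1 : Nat) : Int) := by rw [hjval]; push_cast; ring
      set rest := cs.drop (i + tw.length + 1) with hrestdef
      by_cases hk : PySem.Chars.findFrom cs [')'] ((PySem.Chars.findFrom cs ['('] (i : Int)) + 1) = -1
      · rw [dif_pos hk]
        rw [hcast, PySem.Chars.findFrom_natCast_eq_neg_one_iff cs [')'] _ hb1,
          singleton_infix_iff] at hk
        have hdw2 : rest.dropWhile (· ≠ ')') = [] := by
          rw [List.dropWhile_eq_nil_iff]
          intro x hx; simp; rintro rfl; exact hk hx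
        have h1 : pvSM false sub = (tw.length : Int) + pvSM true rest := by
          rw [pvSM_false_eq, hrest, ← htw]
        have h2 : pvSM true rest = 0 := by
          rw [pvSM_true_eq, hdw2]
        rw [h1, h2, hjval]
        push_cast
        ring
      · rw [dif_neg hk]
        have hkeq := PySem.Chars.findFrom_natCast cs [')'] _ hb1
        rw [← hcast] at hkeq
        rw [if_neg (by intro h; exact hk (by rw [hkeq, if_pos h]))] at hkeq
        have hmem2 : ')' ∈ rest := by
          by_contra hm
          refine hk ?_
          rw [hcast, PySem.Chars.findFrom_natCast_eq_neg_one_iff cs [')'] _ hb1,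
            singleton_infix_iff]
          exact hm
        have hfs2 := find_singleton ')' rest hmem2
        set tw2 := rest.takeWhile (· ≠ ')') with htw2
        have hkval : PySem.Chars.findFrom cs [')'] ((PySem.Chars.findFrom cs ['('] (i : Int)) + 1)
            = ((i + tw.length + 1 + tw2.length : Nat) : Int) := by
          rw [hkeq, hfs2, hjval]; push_cast; ring
        have hdwne2 : rest.dropWhile (· ≠ ')') ≠ [] := by
          intro hnil; rw [List.dropWhile_eq_nil_iff] at hnil; simpa using hnil ')' hmem2
        have htwlt2 : tw2.length < rest.length := by
          have hd := dropWhile_eq_drop_takeWhile (fun x => x ≠ ')') rest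
          rw [← htw2] at hd
          by_contra hge
          exact hdwne2 (by rw [hd, List.drop_eq_nil_iff]; omega)
        have hrestlen : rest.length = cs.length - (i + tw.length + 1) := by simp [hrestdef]
        have hrest2 : rest.dropWhile (· ≠ ')') = ')' :: cs.drop (i + tw.length + 1 + tw2.length + 1) := by
          have hh : (rest.dropWhile (fun x => decide (x ≠ ')'))).head hdwne2 = ')' := by
            have := List.head_dropWhile_not (fun x => decide (x ≠ ')')) hdwne2
            rwa [decide_eq_false_iff_not, not_ne_iff] at this
          rw [← List.cons_head_tail hdwne2, hh]
          congr 1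
          rw [dropWhile_eq_drop_takeWhile, List.tail_drop, ← htw2, hrestdef, List.drop_drop]
          congr 1 <;> omega
        have hstep : (PySem.Chars.findFrom cs [')']
            ((PySem.Chars.findFrom cs ['('] (i : Int)) + 1)).toNat + 1
            = i + tw.length + 1 + tw2.length + 1 := by
          simp [hkval]
          omega
        have h1 : pvSM false sub = (tw.length : Int) + pvSM true rest := by
          rw [pvSM_false_eq, hrest, ← htw]
        have h2 : pvSM true rest = 1 + pvSM false (cs.drop (i + tw.length + 1 + tw2.length + 1)) := by
          rw [pvSM_true_eq, hrest2]
        rw [ih cs _ _ _ (by rw [hstep]; omega)]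
        rw [hstep]
        rw [h1, h2, hjval]
        push_cast
        ring

-- ===== VERDICT (by name: the statement is the Claim_ definition above) =====
theorem get_innings_from_line_spec : Claim_equal_get_innings_from_line := by
  intro s _
  unfold Spec_get_innings_from_line get_innings_from_line get_innings_from_line_alt
  rw [foldl_aStep_eq, altLoop_eq s.toList.length s.toList 0 (Nat.zero_le _) 0 (by omega)]
  simp
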